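-- pv_equiv track=rewrite | github.com/younaman/Serverless-tools | aws_escalate.py | check_escalation_method3
-- ===== SOURCE A (Python) =====
-- def check_escalation_method1(confirmed_list, escalation_method1, method_type):
--     confirmed_set = set(confirmed_list)
--     matched_methods = []
--     for method, required_permissions in escalation_method1.items():
--         required_set = set(required_permissions.keys())
--         if required_set.issubset(confirmed_set):
--             matched_methods.append(f"confirm: '{method}' -> {method_type}")
--     return matched_methods
--
-- def check_escalation_method2(confirmed_list, escalation_method1, escalation_method2, method_type):
--     confirmed_set = set(confirmed_list)
--     matched_methods = []
--     for method2, required_permissions2 in escalation_method2.items():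
--         required_set2 = set(required_permissions2.keys())
--         if required_set2.issubset(confirmed_set):
--             for method1, required_permissions1 in escalation_method1.items():
--                 required_set1 = set(required_permissions1.keys())
--                 if required_set1.issubset(confirmed_set):
--                     matched_methods.append(f"confirm: '{method2}' -> '{method1}' -> {method_type}")
--     return matched_methods
--
-- def check_escalation_method3(confirmed_list, escalation_method1, escalation_method2, escalation_method3, method_type):
--     """
--     Check for attack path 3: Cross-account contamination
--     Only succeeds if attack path 1 or 2 is successful, and specific permissions are available
--     """
--     matched_methods = []
--
--     # First, check if attack path 1 or 2 is successful
--     attack_path1_success = check_escalation_method1(confirmed_list, escalation_method1, "function_escalation_method1")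
--     attack_path2_success = check_escalation_method2(confirmed_list, escalation_method1, escalation_method2, "function_escalation_method2")
--
--     # Only proceed if either attack path 1 or 2 is successful
--     if attack_path1_success or attack_path2_success:
--         confirmed_set = set(confirmed_list)
--
--         # Check for Layer-based contamination
--         if 'lambda:UpdateFunctionConfiguration' in confirmed_set:
--             matched_methods.append(f"confirm: 'lambda:UpdateFunctionConfiguration' -> {method_type}")
--
--         # Check for ECR-based contamination (all 4 permissions must be present)
--         ecr_permissions = ['ecr:BatchGetImage', 'ecr:GetDownloadUrlForLayer', 'lambda:CreateFunction', 'iam:PassRole']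
--         if all(perm in confirmed_set for perm in ecr_permissions):
--             matched_methods.append(f"confirm: 'ecr:BatchGetImage+ecr:GetDownloadUrlForLayer+lambda:CreateFunction+iam:PassRole' -> {method_type}")
--
--     return matched_methods
-- ===== SOURCE B (Python) =====
-- def check_escalation_method3(confirmed_list, escalation_method1, escalation_method2, escalation_method3, method_type):
--     """
--     Same result as the original, computed from one boolean:
--     path 2 succeeds only when path 1 does (both require some method1 whose
--     permissions are all confirmed), so the gate is just 'any method1 matches' --
--     no match lists are built and escalation_method2 is never scanned.
--     """
--     confirmed = set(confirmed_list)
--     if not any(confirmed.issuperset(perms) for perms in escalation_method1.values()):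
--         return []
--     matched = []
--     if 'lambda:UpdateFunctionConfiguration' in confirmed:
--         matched.append(f"confirm: 'lambda:UpdateFunctionConfiguration' -> {method_type}")
--     if confirmed.issuperset(('ecr:BatchGetImage', 'ecr:GetDownloadUrlForLayer',
--                              'lambda:CreateFunction', 'iam:PassRole')):
--         matched.append(f"confirm: 'ecr:BatchGetImage+ecr:GetDownloadUrlForLayer+lambda:CreateFunction+iam:PassRole' -> {method_type}")
--     return matched
-- ===== Notes on version B (the rewrite author's own statement) =====
-- stated objective: faster
-- what changed: Path 2 can only succeed when path 1 does (both require some method1 whose permission keys are all confirmed), so B replaces building both match lists (including A's nested method2-by-method1 scan) with a single early-exit boolean over escalation_method1 and never touches escalation_method2.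
import Mathlib
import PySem

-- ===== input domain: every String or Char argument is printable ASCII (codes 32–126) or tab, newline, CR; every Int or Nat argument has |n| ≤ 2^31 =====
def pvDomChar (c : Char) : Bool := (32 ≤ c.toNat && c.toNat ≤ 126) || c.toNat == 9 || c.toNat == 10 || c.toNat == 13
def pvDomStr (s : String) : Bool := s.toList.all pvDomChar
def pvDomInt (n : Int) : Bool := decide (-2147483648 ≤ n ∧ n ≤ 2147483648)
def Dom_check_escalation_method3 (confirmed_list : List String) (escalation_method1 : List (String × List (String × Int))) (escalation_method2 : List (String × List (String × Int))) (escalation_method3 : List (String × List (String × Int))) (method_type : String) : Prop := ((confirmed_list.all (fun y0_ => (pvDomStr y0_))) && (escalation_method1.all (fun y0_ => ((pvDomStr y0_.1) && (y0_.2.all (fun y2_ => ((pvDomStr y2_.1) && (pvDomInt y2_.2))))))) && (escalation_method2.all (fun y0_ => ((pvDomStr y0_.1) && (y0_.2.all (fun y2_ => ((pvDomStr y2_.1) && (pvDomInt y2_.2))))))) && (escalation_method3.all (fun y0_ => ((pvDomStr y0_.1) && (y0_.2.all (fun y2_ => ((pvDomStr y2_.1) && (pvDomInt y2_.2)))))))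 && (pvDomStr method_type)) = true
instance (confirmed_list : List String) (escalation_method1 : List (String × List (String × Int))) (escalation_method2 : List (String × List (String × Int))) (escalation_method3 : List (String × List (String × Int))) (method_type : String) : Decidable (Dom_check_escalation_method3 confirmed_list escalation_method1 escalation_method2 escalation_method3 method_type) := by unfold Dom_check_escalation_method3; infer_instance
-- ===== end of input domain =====

-- B gates on one boolean (any method1 whose permissions are all confirmed) instead of
-- building the path-1 and path-2 match lists; same return value, no nested scan (objective: faster).

-- ===== PORT A =====
-- helper: check_escalation_method1
def pyCheckEscalationMethod1 (confirmed_list : List String) (escalation_method1 : List (String × List (String × Int))) (method_type : String) : List String :=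
  let confirmed_set := PySem.Set.ofList confirmed_list
  escalation_method1.foldl (fun matched_methods p =>
    let required_set := PySem.Set.ofList (p.2.map Prod.fst)
    if PySem.Set.issubset required_set confirmed_set then
      matched_methods ++ ["confirm: '" ++ p.1 ++ "' -> " ++ method_type]
    else matched_methods) []

-- helper: check_escalation_method2
def pyCheckEscalationMethod2 (confirmed_list : List String) (escalation_method1 : List (String × List (String × Int))) (escalation_method2 : List (String × List (String × Int))) (method_type : String) : List String :=
  let confirmed_set := PySem.Set.ofList confirmed_list
  escalation_method2.foldl (fun matched_methods p2 =>
    let required_set2 := PySem.Set.ofList (p2.2.map Prod.fst)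
    if PySem.Set.issubset required_set2 confirmed_set then
      escalation_method1.foldl (fun matched_methods p1 =>
        let required_set1 := PySem.Set.ofList (p1.2.map Prod.fst)
        if PySem.Set.issubset required_set1 confirmed_set then
          matched_methods ++ ["confirm: '" ++ p2.1 ++ "' -> '" ++ p1.1 ++ "' -> " ++ method_type]
        else matched_methods) matched_methods
    else matched_methods) []

def check_escalation_method3 (confirmed_list : List String) (escalation_method1 : List (String × List (String × Int))) (escalation_method2 : List (String × List (String × Int))) (escalation_method3 : List (String × List (String × Int))) (method_type : String) : List String :=
  let matched_methods : List String := []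
  let attack_path1_success := pyCheckEscalationMethod1 confirmed_list escalation_method1 "function_escalation_method1"
  let attack_path2_success := pyCheckEscalationMethod2 confirmed_list escalation_method1 escalation_method2 "function_escalation_method2"
  if !attack_path1_success.isEmpty || !attack_path2_success.isEmpty then
    let confirmed_set := PySem.Set.ofList confirmed_list
    let matched_methods :=
      if PySem.Set.contains confirmed_set "lambda:UpdateFunctionConfiguration" then
        matched_methods ++ ["confirm: 'lambda:UpdateFunctionConfiguration' -> " ++ method_type]
      else matched_methods
    let ecr_permissions := ["ecr:BatchGetImage", "ecr:GetDownloadUrlForLayer", "lambda:CreateFunction", "iam:PassRole"]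
    let matched_methods :=
      if ecr_permissions.all (fun perm => PySem.Set.contains confirmed_set perm) then
        matched_methods ++ ["confirm: 'ecr:BatchGetImage+ecr:GetDownloadUrlForLayer+lambda:CreateFunction+iam:PassRole' -> " ++ method_type]
      else matched_methods
    matched_methods
  else matched_methods

-- ===== PORT B =====
def check_escalation_method3_alt (confirmed_list : List String) (escalation_method1 : List (String × List (String × Int))) (escalation_method2 : List (String × List (String × Int))) (escalation_method3 : List (String × List (String × Int))) (method_type : String) : List String :=
  let confirmed := PySem.Set.ofList confirmed_list
  if !(escalation_method1.any (fun p => PySem.Set.issuperset confirmed (p.2.map Prod.fst))) then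
    []
  else
    let matched : List String :=
      if PySem.Set.contains confirmed "lambda:UpdateFunctionConfiguration" then
        ["confirm: 'lambda:UpdateFunctionConfiguration' -> " ++ method_type]
      else []
    if PySem.Set.issuperset confirmed ["ecr:BatchGetImage", "ecr:GetDownloadUrlForLayer", "lambda:CreateFunction", "iam:PassRole"] then
      matched ++ ["confirm: 'ecr:BatchGetImage+ecr:GetDownloadUrlForLayer+lambda:CreateFunction+iam:PassRole' -> " ++ method_type]
    else matched

-- ===== PRECONDITION & SPEC =====
def Spec_check_escalation_method3 (confirmed_list : List String) (escalation_method1 : List (String × List (String × Int))) (escalation_method2 : List (String × List (String × Int))) (escalation_method3 : List (String × List (String × Int))) (method_type : String) (out : List String) : Prop := out = check_escalation_method3_alt confirmed_list escalation_method1 escalation_method2 escalation_method3 method_type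
instance (confirmed_list : List String) (escalation_method1 : List (String × List (String × Int))) (escalation_method2 : List (String × List (String × Int))) (escalation_method3 : List (String × List (String × Int))) (method_type : String) (out : List String) : Decidable (Spec_check_escalation_method3 confirmed_list escalation_method1 escalation_method2 escalation_method3 method_type out) := by unfold Spec_check_escalation_method3; infer_instance

-- ===== CLAIM (what is proved, stated in full; the proofs are below) =====
def Claim_equal_check_escalation_method3 : Prop := ∀ (confirmed_list : List String) (escalation_method1 : List (String × List (String × Int))) (escalation_method2 : List (String × List (String × Int))) (escalation_method3 : List (String × List (String × Int))) (method_type : String), Dom_check_escalation_method3 confirmed_list escalation_method1 escalation_method2 escalation_method3 method_type → Spec_check_escalation_method3 confirmed_list escalation_method1 escalation_method2 escalation_method3 method_type (check_escalation_method3 confirmed_list escalation_method1 escalation_method2 escalation_method3 method_type)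

-- ===== LEMMAS AND PROOFS =====

-- all over set(xs) equals all over xs (same members)
theorem all_ofList {α : Type} [BEq α] [LawfulBEq α] (xs : List α) (p : α → Bool) :
    (PySem.Set.ofList xs).all p = xs.all p := by
  apply Bool.eq_iff_iff.mpr
  simp [List.all_eq_true, PySem.Set.mem_ofList]

-- A's subset test on an entry equals B's superset test
theorem cond_eq (cs : PySem.Set String) (ks : List String) :
    PySem.Set.issubset (PySem.Set.ofList ks) cs = PySem.Set.issuperset cs ks := by
  simp [PySem.Set.issubset, PySem.Set.issuperset, all_ofList]

-- check_escalation_method1's loop as filter+map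
theorem ce1_eq (confirmed_list : List String) (em1 : List (String × List (String × Int))) (mt : String) :
    pyCheckEscalationMethod1 confirmed_list em1 mt =
      (em1.filter (fun p => PySem.Set.issubset (PySem.Set.ofList (p.2.map Prod.fst)) (PySem.Set.ofList confirmed_list))).map
        (fun p => "confirm: '" ++ p.1 ++ "' -> " ++ mt) := by
  unfold pyCheckEscalationMethod1
  rw [PySem.List.foldl_append_if]
  simp

-- if no method1 entry matches, check_escalation_method2 returns []
theorem ce2_empty (confirmed_list : List String) (em1 em2 : List (String × List (String × Int))) (mt : String)
    (h : em1.all (fun p => !PySem.Set.issubset (PySem.Set.ofList (p.2.map Prod.fst)) (PySem.Set.ofList confirmed_list)) = true) :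
    pyCheckEscalationMethod2 confirmed_list em1 em2 mt = [] := by
  unfold pyCheckEscalationMethod2
  have inner : ∀ (acc : List String) (s : String),
      em1.foldl (fun matched_methods p1 =>
        if PySem.Set.issubset (PySem.Set.ofList (p1.2.map Prod.fst)) (PySem.Set.ofList confirmed_list) then
          matched_methods ++ ["confirm: '" ++ s ++ "' -> '" ++ p1.1 ++ "' -> " ++ mt]
        else matched_methods) acc = acc := by
    intro acc s
    rw [PySem.List.foldl_append_if]
    have : em1.filter (fun p => PySem.Set.issubset (PySem.Set.ofList (p.2.map Prod.fst)) (PySem.Set.ofList confirmed_list)) = [] := by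
      rw [List.filter_eq_nil_iff]
      intro p hp
      have := (List.all_eq_true.mp h) p hp
      simp only [Bool.not_eq_true]
      revert this; cases ((PySem.Set.ofList (p.2.map Prod.fst)).issubset (PySem.Set.ofList confirmed_list)) <;> simp
    simp [this]
  induction em2 with
  | nil => rfl
  | cons q t ih =>
      simp only [List.foldl_cons]
      split
      · rw [inner]; exact ih
      · exact ih

-- ===== VERDICT (by name: the statement is the Claim_ definition above) =====
theorem check_escalation_method3_spec : Claim_equal_check_escalation_method3 := by
  intro confirmed_list em1 em2 em3 mt _
  unfold Spec_check_escalation_method3 check_escalation_method3 check_escalation_method3_alt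
  by_cases hb : em1.any (fun p => PySem.Set.issuperset (PySem.Set.ofList confirmed_list) (p.2.map Prod.fst)) = true
  · -- some method1 matches: both take the positive branch, same body
    have h1 : (pyCheckEscalationMethod1 confirmed_list em1 "function_escalation_method1").isEmpty = false := by
      rw [ce1_eq]
      rcases List.any_eq_true.mp hb with ⟨p, hp, hcond⟩
      have : p ∈ em1.filter (fun p => PySem.Set.issubset (PySem.Set.ofList (p.2.map Prod.fst)) (PySem.Set.ofList confirmed_list)) := by
        rw [List.mem_filter]
        exact ⟨hp, by rw [cond_eq]; exact hcond⟩
      cases hf : em1.filter (fun p => PySem.Set.issubset (PySem.Set.ofList (p.2.map Prod.fst)) (PySem.Set.ofList confirmed_list)) with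
      | nil => rw [hf] at this; cases this
      | cons a t => simp
    simp only [hb, h1]
    simp [PySem.Set.issuperset, PySem.Set.issubset]
  · -- no method1 matches: both gates are false
    have hb' : em1.all (fun p => !PySem.Set.issubset (PySem.Set.ofList (p.2.map Prod.fst)) (PySem.Set.ofList confirmed_list)) = true := by
      rw [List.all_eq_true]
      intro p hp
      by_contra hc
      exact hb (List.any_eq_true.mpr ⟨p, hp, by rw [← cond_eq]; simpa using hc⟩)
    have h1 : pyCheckEscalationMethod1 confirmed_list em1 "function_escalation_method1" = [] := by
      rw [ce1_eq]
      have : em1.filter (fun p => PySem.Set.issubset (PySem.Set.ofList (p.2.map Prod.fst)) (PySem.Set.ofList confirmed_list)) = [] := by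
        rw [List.filter_eq_nil_iff]
        intro p hp
        have := (List.all_eq_true.mp hb') p hp
        simp only [Bool.not_eq_true]
        revert this; cases ((PySem.Set.ofList (p.2.map Prod.fst)).issubset (PySem.Set.ofList confirmed_list)) <;> simp
      simp [this]
    have h2 := ce2_empty confirmed_list em1 em2 "function_escalation_method2" hb'
    simp [h1, h2, hb]
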